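-- pv_equiv track=rewrite | github.com/ZoradanHawk/note-sequences | sequence_toolkit.py | group_by_pauses
-- ===== SOURCE A (Python) =====
-- def group_by_pauses(sequence):
--
--     '''Component of the grouped sequence. Takes a sequence and
--     groups elements between pauses into tuples within the sequence.'''
--
--     final = []
--     group = []
--     for i, note in enumerate(sequence[:-1]):
--         next_note = sequence[i + 1]
--         if note == (5,):
--             group.append(note)
--         elif next_note == (5,):
--             final.append(tuple(group) + (note,))
--             group = []
--         else:
--             group.append(note)
--     group.append(sequence[-1])
--     final.append(tuple(group))
--     return final
-- ===== SOURCE B (Python) =====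
-- def group_by_pauses(sequence):
--     '''Build the groups right-to-left: walking backwards, start a new group
--     before each position where a non-(5,) element is followed by (5,);
--     otherwise prepend the element into the current first group.'''
--     if len(sequence) <= 1:
--         return [tuple(sequence)]
--     groups = [(sequence[-1],)]
--     rest_first = sequence[-1]
--     for head in reversed(sequence[:-1]):
--         if head != (5,) and rest_first == (5,):
--             groups.insert(0, (head,))
--         else:
--             groups[0] = (head,) + groups[0]
--         rest_first = head
--     return groups
-- ===== Notes on version B (the rewrite author's own statement) =====
-- stated objective: alternative
-- what changed: Replaced A's stateful left-to-right loop with (final, group) accumulators and an index lookup for the next element by a right-to-left pass that builds the grouping back-to-front, starting a new group at each split and prepending each element into the current first group.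
import Mathlib
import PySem

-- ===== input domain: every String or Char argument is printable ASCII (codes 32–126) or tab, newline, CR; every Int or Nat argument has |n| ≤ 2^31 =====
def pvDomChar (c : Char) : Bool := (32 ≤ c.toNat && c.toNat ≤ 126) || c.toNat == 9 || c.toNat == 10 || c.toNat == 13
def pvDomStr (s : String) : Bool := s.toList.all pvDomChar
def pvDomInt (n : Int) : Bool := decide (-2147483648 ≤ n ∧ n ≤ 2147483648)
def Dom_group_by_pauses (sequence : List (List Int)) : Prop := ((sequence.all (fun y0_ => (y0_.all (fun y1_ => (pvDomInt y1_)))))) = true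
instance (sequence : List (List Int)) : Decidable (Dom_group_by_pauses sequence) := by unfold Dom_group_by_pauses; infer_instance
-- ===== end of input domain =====

-- B builds the grouping right-to-left (prepending into the first group) instead of A's left-to-right
-- loop with (final, group) accumulators and index lookups; same cost, return value only (no mutation).

-- ===== PORT A =====
def group_by_pauses (sequence : List (List Int)) : List (List (List Int)) :=
  let st :=
    (PySem.List.enumerate (PySem.List.slice sequence none (some (-1)))).foldl
      (fun (st : List (List (List Int)) × List (List Int)) p =>
        let final := st.1
        let group := st.2
        let note := p.2
        let next_note := PySem.List.pyGetD sequence (p.1 + 1) ([] : List Int)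
        if note = [5] then (final, group ++ [note])
        else if next_note = [5] then (final ++ [group ++ [note]], ([] : List (List Int)))
        else (final, group ++ [note])) ([], [])
  st.1 ++ [st.2 ++ [PySem.List.pyGetD sequence (-1) ([] : List Int)]]

-- ===== PORT B =====
def group_by_pauses_alt (sequence : List (List Int)) : List (List (List Int)) :=
  if sequence.length ≤ 1 then [sequence]
  else
    let last := PySem.List.pyGetD sequence (-1) ([] : List Int)
    ((PySem.List.slice sequence none (some (-1))).reverse.foldl
      (fun (st : List (List (List Int)) × List Int) head =>
        let groups := st.1
        let rest_first := st.2
        if head ≠ [5] ∧ rest_first = [5] then ([head] :: groups, head)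
        else (([head] ++ groups.headD []) :: groups.tail, head)) ([[last]], last)).1

-- ===== PRECONDITION & SPEC =====
-- Pre_ excludes only the empty sequence, on which A's `sequence[-1]` raises IndexError.
def Pre_group_by_pauses (sequence : List (List Int)) : Prop := sequence ≠ []
instance (sequence : List (List Int)) : Decidable (Pre_group_by_pauses sequence) := by unfold Pre_group_by_pauses; infer_instance
def pvWitness_group_by_pauses : List (List Int) := [[1], [5], [2]]

def Spec_group_by_pauses (sequence : List (List Int)) (out : List (List (List Int))) : Prop := out = group_by_pauses_alt sequence
instance (sequence : List (List Int)) (out : List (List (List Int))) : Decidable (Spec_group_by_pauses sequence out) := by unfold Spec_group_by_pauses; infer_instance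

-- ===== CLAIM (what is proved, stated in full; the proofs are below) =====
def Claim_equal_group_by_pauses : Prop := ∀ (sequence : List (List Int)), Dom_group_by_pauses sequence → Pre_group_by_pauses sequence → Spec_group_by_pauses sequence (group_by_pauses sequence)

-- ===== LEMMAS AND PROOFS =====

-- common characterisation of the grouping, by head recursion
def segs : List (List Int) → List (List (List Int))
  | [] => [[]]
  | [x] => [[x]]
  | x :: rest =>
    if x ≠ [5] ∧ rest.headD [] = [5] then [x] :: segs rest
    else ([x] ++ (segs rest).headD []) :: (segs rest).tail

-- A's loop body, as a pure function of (note, next_note)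
def pvBody (st : List (List (List Int)) × List (List Int)) (q : List Int × List Int) :
    List (List (List Int)) × List (List Int) :=
  if q.1 = [5] then (st.1, st.2 ++ [q.1])
  else if q.2 = [5] then (st.1 ++ [st.2 ++ [q.1]], ([] : List (List Int)))
  else (st.1, st.2 ++ [q.1])

-- B's loop body (state = (groups, rest_first)), applied by foldr after reversing
def pvStep (head : List Int) (st : List (List (List Int)) × List Int) :
    List (List (List Int)) × List Int :=
  if head ≠ [5] ∧ st.2 = [5] then ([head] :: st.1, head)
  else (([head] ++ st.1.headD []) :: st.1.tail, head)

theorem segs_ne_nil (s : List (List Int)) : segs s ≠ [] := by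
  match s with
  | [] => simp [segs]
  | [x] => simp [segs]
  | x :: y :: t =>
    simp only [segs]
    split <;> simp

-- the enumerate/pyGetD pass over sequence[:-1] reads exactly the (note, next) pairs
theorem map_enum_eq_zip (s : List (List Int)) :
    (PySem.List.enumerate s.dropLast).map
      (fun p => (p.2, PySem.List.pyGetD s (p.1 + 1) ([] : List Int)))
      = s.dropLast.zip s.tail := by
  apply List.ext_getElem
  · simp [PySem.List.length_enumerate]
  · intro k h1 h2
    have hk : k < s.length - 1 := by
      simp only [List.length_zip, List.length_dropLast, List.length_tail, min_self] at h2
      omega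
    have hd : k < s.dropLast.length := by simp; omega
    have hget : (PySem.List.enumerate s.dropLast)[k]'(by simpa [PySem.List.length_enumerate] using hd)
        = ((k : Int), s.dropLast[k]'hd) := by
      simpa using PySem.List.getElem_enumerate (xs := s.dropLast) (s := 0) (k := k)
        (by simpa [PySem.List.length_enumerate] using hd)
    have hidx : PySem.List.pyGetD s ((k : Int) + 1) ([] : List Int) = s[k + 1]'(by omega) := by
      have : ((k : Int) + 1) = ((k + 1 : Nat) : Int) := by push_cast; ring
      rw [this, PySem.List.pyGetD_natCast]
      exact List.getD_eq_getElem _ _ (by omega)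
    simp only [List.getElem_map, hget, hidx, List.getElem_zip, List.getElem_dropLast,
      List.getElem_tail]

-- A's fold from any accumulator state produces `final`, then `group` merged into the head of segs
theorem arun_eq_segs (t : List (List Int)) : ∀ (x : List Int)
    (final : List (List (List Int))) (group : List (List Int)),
    (((x :: t).dropLast.zip (x :: t).tail).foldl pvBody (final, group)).1 ++
      [(((x :: t).dropLast.zip (x :: t).tail).foldl pvBody (final, group)).2 ++
        [(x :: t).getLast (by simp)]]
    = final ++ (group ++ (segs (x :: t)).headD []) :: (segs (x :: t)).tail := by
  induction t with
  | nil => intro x final group; simp [segs]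
  | cons y t' ih =>
    intro x final group
    have hzip : (x :: y :: t').dropLast.zip (x :: y :: t').tail
        = (x, y) :: ((y :: t').dropLast.zip (y :: t').tail) := by
      cases t' <;> simp
    have hlast : (x :: y :: t').getLast (by simp) = (y :: t').getLast (by simp) := by
      simp [List.getLast]
    rw [hzip]
    simp only [List.foldl_cons, hlast]
    by_cases hx : x = [5]
    · have hb : pvBody (final, group) (x, y) = (final, group ++ [x]) := by
        simp [pvBody, hx]
      rw [hb, ih y final (group ++ [x])]
      conv_rhs => rw [show segs (x :: y :: t')
        = ([x] ++ (segs (y :: t')).headD []) :: (segs (y :: t')).tail by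
          simp only [segs]
          rw [if_neg (by simp [hx])]]
      simp
    · by_cases hy : y = [5]
      · have hb : pvBody (final, group) (x, y) = (final ++ [group ++ [x]], []) := by
          simp [pvBody, hx, hy]
        rw [hb, ih y (final ++ [group ++ [x]]) []]
        have hne := segs_ne_nil (y :: t')
        conv_rhs => rw [show segs (x :: y :: t')
          = [x] :: segs (y :: t') by
            simp only [segs]
            rw [if_pos ⟨hx, by simp [hy]⟩]]
        obtain ⟨g, gs, hg⟩ : ∃ g gs, segs (y :: t') = g :: gs := by
          cases h : segs (y :: t') with
          | nil => exact absurd h hne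
          | cons g gs => exact ⟨g, gs, rfl⟩
        simp [hg]
      · have hb : pvBody (final, group) (x, y) = (final, group ++ [x]) := by
          simp [pvBody, hx, hy]
        rw [hb, ih y final (group ++ [x])]
        conv_rhs => rw [show segs (x :: y :: t')
          = ([x] ++ (segs (y :: t')).headD []) :: (segs (y :: t')).tail by
            simp only [segs]
            rw [if_neg (by simp [hy])]]
        simp

-- B's backwards pass extends a grouped suffix one element at a time
theorem foldr_pvStep (l : List (List Int)) : ∀ (y : List Int) (t : List (List Int)),
    l.foldr pvStep (segs (y :: t), y) = (segs (l ++ y :: t), (l ++ y :: t).headD y) := by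
  induction l with
  | nil => intro y t; simp
  | cons x l' ih =>
    intro y t
    rw [List.foldr_cons, ih y t]
    obtain ⟨z, r, hzr⟩ : ∃ z r, l' ++ y :: t = z :: r := by
      cases h : l' ++ y :: t with
      | nil => exact absurd h (by simp)
      | cons z r => exact ⟨z, r, rfl⟩
    rw [List.cons_append, hzr]
    simp only [List.headD_cons]
    show pvStep x (segs (z :: r), z) = (segs (x :: z :: r), x)
    rw [show segs (x :: z :: r)
      = if x ≠ [5] ∧ (z :: r).headD [] = [5] then [x] :: segs (z :: r)
        else ([x] ++ (segs (z :: r)).headD []) :: (segs (z :: r)).tail from rfl]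
    unfold pvStep
    by_cases hc : x ≠ [5] ∧ z = [5] <;> simp [hc]

theorem alt_eq_segs (s : List (List Int)) : group_by_pauses_alt s = segs s := by
  match s with
  | [] => rfl
  | [x] => rfl
  | x :: y :: t =>
    unfold group_by_pauses_alt
    rw [if_neg (by simp)]
    rw [PySem.List.slice_to_neg_one,
      PySem.List.pyGetD_neg_one (xs := x :: y :: t) (h := by simp)]
    show ((x :: y :: t).dropLast.reverse.foldl (fun st head => pvStep head st)
      ([[(x :: y :: t).getLast (by simp)]], (x :: y :: t).getLast (by simp))).1
      = segs (x :: y :: t)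
    rw [List.foldl_reverse]
    have h := foldr_pvStep ((x :: y :: t).dropLast) ((x :: y :: t).getLast (by simp)) []
    rw [List.dropLast_concat_getLast (by simp)] at h
    simpa using congrArg Prod.fst h

-- ===== VERDICT (by name: the statement is the Claim_ definition above) =====
theorem group_by_pauses_spec : Claim_equal_group_by_pauses := by
  intro s _ hpre
  unfold Spec_group_by_pauses
  obtain ⟨x, t, rfl⟩ : ∃ x t, s = x :: t := by
    cases s with
    | nil => exact absurd rfl hpre
    | cons x t => exact ⟨x, t, rfl⟩
  rw [alt_eq_segs]
  unfold group_by_pauses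
  rw [PySem.List.slice_to_neg_one]
  rw [show (PySem.List.enumerate (x :: t).dropLast).foldl
      (fun (st : List (List (List Int)) × List (List Int)) p =>
        let final := st.1
        let group := st.2
        let note := p.2
        let next_note := PySem.List.pyGetD (x :: t) (p.1 + 1) ([] : List Int)
        if note = [5] then (final, group ++ [note])
        else if next_note = [5] then (final ++ [group ++ [note]], ([] : List (List Int)))
        else (final, group ++ [note])) ([], [])
    = ((x :: t).dropLast.zip (x :: t).tail).foldl pvBody ([], []) by
      rw [← map_enum_eq_zip (x :: t), List.foldl_map]
      rfl]
  rw [PySem.List.pyGetD_neg_one (xs := x :: t) (h := by simp)]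
  have harun := arun_eq_segs t x [] []
  obtain ⟨g, gs, hg⟩ : ∃ g gs, segs (x :: t) = g :: gs := by
    cases h : segs (x :: t) with
    | nil => exact absurd h (segs_ne_nil (x :: t))
    | cons g gs => exact ⟨g, gs, rfl⟩
  rw [hg] at harun
  simpa [hg] using harun
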